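-- pv_equiv track=rewrite | github.com/Ookamiko/AdventOfCode | year_2016/day/day13.py | update_maze
-- ===== SOURCE A (Python) =====
-- def update_maze(maze, x_current, y_current):
-- 	maze_cpy = []
-- 	for y in range(len(maze)):
-- 		corridor = []
-- 		for x in range(len(maze[y])):
-- 			if x == x_current and y == y_current:
-- 				corridor.append('0')
-- 			else:
-- 				corridor.append(maze[y][x])
-- 		maze_cpy.append(corridor)
--
-- 	return maze_cpy
-- ===== SOURCE B (Python) =====
-- def update_maze(maze, x_current, y_current):
-- 	if not maze:
-- 		return []
-- 	head = maze[0]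
-- 	if y_current == 0 and 0 <= x_current < len(head):
-- 		new_head = head[:x_current] + ['0'] + head[x_current + 1:]
-- 	else:
-- 		new_head = list(head)
-- 	return [new_head] + update_maze(maze[1:], x_current, y_current - 1)
-- ===== Notes on version B (the rewrite author's own statement) =====
-- stated objective: alternative
-- what changed: Replaces the index-driven nested loops with a branch per cell by structural recursion on the row list that shifts y_current down at each step and splices the one affected row with slices (head[:x] + ['0'] + head[x+1:]) instead of rebuilding it element by element.
import Mathlib
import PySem

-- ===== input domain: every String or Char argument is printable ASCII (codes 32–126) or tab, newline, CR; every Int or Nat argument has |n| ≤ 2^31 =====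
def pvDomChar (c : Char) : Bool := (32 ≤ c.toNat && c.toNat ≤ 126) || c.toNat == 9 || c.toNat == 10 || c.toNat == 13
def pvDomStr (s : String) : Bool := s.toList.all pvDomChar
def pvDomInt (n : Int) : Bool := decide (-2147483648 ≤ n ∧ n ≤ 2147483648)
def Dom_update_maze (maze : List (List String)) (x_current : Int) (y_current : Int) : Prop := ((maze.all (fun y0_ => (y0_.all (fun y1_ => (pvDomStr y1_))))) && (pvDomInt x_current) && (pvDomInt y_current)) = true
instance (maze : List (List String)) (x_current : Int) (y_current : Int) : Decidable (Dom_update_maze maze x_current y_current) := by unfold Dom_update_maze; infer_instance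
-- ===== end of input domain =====

-- B replaces A's index-driven nested loops by structural recursion on the rows, shifting
-- y_current at each step and splicing the one affected row with slices (objective: alternative).

-- ===== PORT A =====
-- inner loop: for x in range(len(maze[y])): append '0' or maze[y][x]
def update_maze_row (row : List String) (x_current : Int) (yi : Int) (y_current : Int) : List String :=
  (PySem.List.pyRange 0 (row.length : Int) 1).foldl
    (fun cor xi => cor ++ [if xi = x_current ∧ yi = y_current then "0" else PySem.List.pyGetD row xi ""]) []

def update_maze (maze : List (List String)) (x_current : Int) (y_current : Int) : List (List String) :=
  (PySem.List.pyRange 0 (maze.length : Int) 1).foldl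
    (fun acc yi => acc ++ [update_maze_row (PySem.List.pyGetD maze yi []) x_current yi y_current]) []

-- ===== PORT B =====
-- recursion on the row list; head[:x] ++ ['0'] ++ head[x+1:] splice via PySem slices
def update_maze_alt (maze : List (List String)) (x_current : Int) (y_current : Int) : List (List String) :=
  match maze with
  | [] => []
  | head :: tail =>
    (if y_current = 0 ∧ 0 ≤ x_current ∧ x_current < (head.length : Int) then
       PySem.List.slice head none (some x_current) ++ ["0"] ++ PySem.List.slice head (some (x_current + 1)) none
     else head.map id)
    :: update_maze_alt tail x_current (y_current - 1)

-- ===== PRECONDITION & SPEC =====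
def Spec_update_maze (maze : List (List String)) (x_current : Int) (y_current : Int) (out : List (List String)) : Prop := out = update_maze_alt maze x_current y_current
instance (maze : List (List String)) (x_current : Int) (y_current : Int) (out : List (List String)) : Decidable (Spec_update_maze maze x_current y_current out) := by unfold Spec_update_maze; infer_instance

-- ===== CLAIM (what is proved, stated in full; the proofs are below) =====
def Claim_equal_update_maze : Prop := ∀ (maze : List (List String)) (x_current : Int) (y_current : Int), Dom_update_maze maze x_current y_current → Spec_update_maze maze x_current y_current (update_maze maze x_current y_current)

-- ===== LEMMAS AND PROOFS =====

theorem foldl_app_singleton {α β : Type} (f : β → α) (l : List β) (init : List α) :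
    l.foldl (fun acc j => acc ++ [f j]) init = init ++ l.map f := by
  induction l generalizing init with
  | nil => simp
  | cons a t ih => simp [ih]

theorem update_maze_eq_map (maze : List (List String)) (x_current y_current : Int) :
    update_maze maze x_current y_current =
      (PySem.List.pyRange 0 (maze.length : Int) 1).map
        (fun yi => update_maze_row (PySem.List.pyGetD maze yi []) x_current yi y_current) := by
  unfold update_maze
  rw [foldl_app_singleton, List.nil_append]

theorem row_eq_map (row : List String) (x_current yi y_current : Int) :
    update_maze_row row x_current yi y_current =
      (PySem.List.pyRange 0 (row.length : Int) 1).map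
        (fun xi => if xi = x_current ∧ yi = y_current then "0" else PySem.List.pyGetD row xi "") := by
  unfold update_maze_row
  rw [foldl_app_singleton, List.nil_append]

-- a row in which the guarded condition never fires is copied unchanged
theorem row_id (row : List String) (x_current yi y_current : Int)
    (h : ∀ xi : Int, 0 ≤ xi → xi < (row.length : Int) → ¬ (xi = x_current ∧ yi = y_current)) :
    update_maze_row row x_current yi y_current = row := by
  rw [row_eq_map]
  have hc : ∀ xi ∈ PySem.List.pyRange 0 (row.length : Int) 1,
      (if xi = x_current ∧ yi = y_current then "0" else PySem.List.pyGetD row xi "") =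
        PySem.List.pyGetD row xi "" := by
    intro xi hxi
    rw [PySem.List.mem_pyRange_one] at hxi
    simp [h xi hxi.1 hxi.2]
  rw [List.map_congr_left hc]
  simpa using PySem.List.map_pyGetD_pyRange_zero' row ""

-- the target row equals a single List.set write
theorem row_set (row : List String) (x y : Int) (hx0 : 0 ≤ x) :
    update_maze_row row x y y = row.set x.toNat "0" := by
  rw [row_eq_map]
  apply List.ext_getElem
  · simp [PySem.List.length_pyRange_one]
  · intro k hk hk'
    have hklen : k < row.length := by simpa using hk'
    rw [List.getElem_map, PySem.List.getElem_pyRange_one, zero_add, List.getElem_set]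
    by_cases hkx : (k : Int) = x
    · rw [if_pos ⟨hkx, rfl⟩, if_pos (by omega)]
    · rw [if_neg (fun hc => hkx hc.1), if_neg (by omega),
          PySem.List.pyGetD_eq_getElem row "" (by omega) (by simpa using hklen)]
      simp

-- the slice splice equals the single List.set write
theorem splice_eq_set (row : List String) (x : Int) (h0 : 0 ≤ x) (h1 : x < (row.length : Int)) :
    PySem.List.slice row none (some x) ++ ["0"] ++ PySem.List.slice row (some (x + 1)) none =
      row.set x.toNat "0" := by
  rw [PySem.List.slice_to _ h0, PySem.List.slice_from _ (by omega)]
  have hx : x.toNat < row.length := by omega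
  have hadd : (x + 1).toNat = x.toNat + 1 := by omega
  rw [hadd, List.set_eq_take_append_cons_drop, if_pos hx]
  simp

theorem alt_length (maze : List (List String)) (x y : Int) :
    (update_maze_alt maze x y).length = maze.length := by
  induction maze generalizing y with
  | nil => rfl
  | cons h t ih => simp [update_maze_alt, ih]

theorem alt_getElem (maze : List (List String)) (x y : Int) (j : Nat) (hj : j < maze.length)
    (hj' : j < (update_maze_alt maze x y).length) :
    (update_maze_alt maze x y)[j] =
      if (j : Int) = y ∧ 0 ≤ x ∧ x < ((maze[j]).length : Int) then
        PySem.List.slice maze[j] none (some x) ++ ["0"] ++ PySem.List.slice maze[j] (some (x + 1)) none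
      else maze[j].map id := by
  induction maze generalizing y j with
  | nil => exact absurd hj (by simp)
  | cons h t ih =>
    cases j with
    | zero =>
      simp only [update_maze_alt, List.getElem_cons_zero]
      by_cases hy : y = 0
      · subst hy; simp
      · rw [if_neg (fun hc => hy hc.1), if_neg (by
          intro hc
          exact hy (by exact_mod_cast hc.1.symm))]
    | succ k =>
      have hk : k < t.length := by simpa using hj
      simp only [update_maze_alt, List.getElem_cons_succ]
      rw [ih (y - 1) k hk (by rw [alt_length]; exact hk)]
      by_cases hc : (k : Int) = y - 1
      · have hky : ((k + 1 : Nat) : Int) = y := by push_cast at hc ⊢; omega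
        by_cases hx : 0 ≤ x ∧ x < ((t[k]).length : Int)
        · rw [if_pos ⟨hc, hx.1, hx.2⟩, if_pos ⟨hky, hx.1, hx.2⟩]
        · rw [if_neg (fun h' => hx ⟨h'.2.1, h'.2.2⟩), if_neg (fun h' => hx ⟨h'.2.1, h'.2.2⟩)]
      · rw [if_neg (fun h' => hc (by push_cast at h'; omega)),
            if_neg (fun h' => hc (by push_cast at h'; omega))]

theorem update_maze_spec_aux (maze : List (List String)) (x y : Int) :
    update_maze maze x y = update_maze_alt maze x y := by
  rw [update_maze_eq_map]
  apply List.ext_getElem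
  · simp [PySem.List.length_pyRange_one, alt_length]
  · intro j hj hj'
    have hjlen : j < maze.length := by rw [alt_length] at hj'; exact hj'
    rw [List.getElem_map, PySem.List.getElem_pyRange_one, zero_add,
        alt_getElem maze x y j hjlen hj',
        PySem.List.pyGetD_eq_getElem maze [] (by omega) (by simpa using hjlen)]
    simp only [Int.toNat_natCast]
    by_cases hcond : (j : Int) = y ∧ 0 ≤ x ∧ x < ((maze[j]).length : Int)
    · rw [if_pos hcond]
      obtain ⟨hjy, hx0, hx1⟩ := hcond
      subst hjy
      rw [row_set _ _ _ hx0, splice_eq_set _ _ hx0 hx1]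
    · rw [if_neg hcond, row_id, List.map_id]
      intro xi hxi0 hxi1 hc
      exact hcond ⟨hc.2, hc.1 ▸ hxi0, hc.1 ▸ hxi1⟩

-- ===== VERDICT (by name: the statement is the Claim_ definition above) =====
theorem update_maze_spec : Claim_equal_update_maze := by
  intro maze x y _
  exact update_maze_spec_aux maze x y
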